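-- pv_equiv track=rewrite | github.com/srihari-122/Job-portal | ai_resume_analyzer.py | _get_general_recommendations
-- ===== SOURCE A (Python) =====
-- from typing import Dict, List, Any
--
-- def _get_general_recommendations(skills: List[str], experience: int, role: str) -> List[str]:
--     """General recommendations for unknown roles"""
--     recommendations = []
--
--     if len(skills) < 10:
--         recommendations.append("Expand your technical skill set")
--     if not any('git' in skill for skill in skills):
--         recommendations.append("Master version control with Git")
--     if not any('testing' in skill for skill in skills):
--         recommendations.append("Learn software testing methodologies")
--     if not any('documentation' in skill for skill in skills):
--         recommendations.append("Improve technical documentation skills")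
--
--     return recommendations
-- ===== SOURCE B (Python) =====
-- from typing import List
--
-- def _get_general_recommendations(skills: List[str], experience: int, role: str) -> List[str]:
--     """General recommendations for unknown roles (worklist of unsatisfied rules)."""
--     pending = [("git", "Master version control with Git"),
--                ("testing", "Learn software testing methodologies"),
--                ("documentation", "Improve technical documentation skills")]
--     for skill in skills:
--         if not pending:
--             break
--         pending = [(needle, msg) for (needle, msg) in pending if needle not in skill]
--     head = ["Expand your technical skill set"] if len(skills) < 10 else []
--     return head + [msg for (_, msg) in pending]
-- ===== Notes on version B (the rewrite author's own statement) =====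
-- stated objective: alternative
-- what changed: B keeps a shrinking worklist of (substring, message) rules, pruning satisfied rules as it scans skills once (stopping early when the worklist empties), then emits the size message followed by the surviving rules' messages; A instead runs a separate any()-scan of the whole list per rule.
import Mathlib
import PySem

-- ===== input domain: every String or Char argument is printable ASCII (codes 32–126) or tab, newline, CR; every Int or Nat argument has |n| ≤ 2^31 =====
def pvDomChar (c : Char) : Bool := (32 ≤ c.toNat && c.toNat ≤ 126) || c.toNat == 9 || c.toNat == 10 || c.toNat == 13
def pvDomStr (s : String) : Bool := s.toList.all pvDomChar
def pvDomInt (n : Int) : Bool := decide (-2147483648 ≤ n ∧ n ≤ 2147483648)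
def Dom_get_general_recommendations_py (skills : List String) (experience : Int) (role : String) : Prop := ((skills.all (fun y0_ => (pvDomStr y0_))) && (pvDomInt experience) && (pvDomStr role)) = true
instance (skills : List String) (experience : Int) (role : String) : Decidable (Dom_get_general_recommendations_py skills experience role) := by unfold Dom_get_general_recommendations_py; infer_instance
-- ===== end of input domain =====

-- B replaces A's per-rule any()-scans with one scan over skills pruning a worklist of (substring, message) rules, with early exit when the worklist empties (objective: alternative).


-- ===== PORT A =====
def get_general_recommendations_py (skills : List String) (experience : Int) (role : String) : List String :=
  let recommendations : List String := []
  let recommendations := if skills.length < 10 then recommendations ++ ["Expand your technical skill set"] else recommendations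
  let recommendations := if !(skills.any (fun skill => PySem.Str.isIn "git" skill)) then recommendations ++ ["Master version control with Git"] else recommendations
  let recommendations := if !(skills.any (fun skill => PySem.Str.isIn "testing" skill)) then recommendations ++ ["Learn software testing methodologies"] else recommendations
  let recommendations := if !(skills.any (fun skill => PySem.Str.isIn "documentation" skill)) then recommendations ++ ["Improve technical documentation skills"] else recommendations
  recommendations

-- ===== PORT B =====
-- worklist of (needle, message) rules, pruned while scanning skills; early exit on empty worklist
def pvRules : List (String × String) :=
  [("git", "Master version control with Git"),
   ("testing", "Learn software testing methodologies"),
   ("documentation", "Improve technical documentation skills")]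

def pvPrune : List String → List (String × String) → List (String × String)
  | [], pending => pending
  | skill :: rest, pending =>
      if pending.isEmpty then pending
      else pvPrune rest (pending.filter (fun r => !PySem.Str.isIn r.1 skill))

def get_general_recommendations_py_alt (skills : List String) (experience : Int) (role : String) : List String :=
  let pending := pvPrune skills pvRules
  (if skills.length < 10 then ["Expand your technical skill set"] else []) ++ pending.map Prod.snd

-- ===== PRECONDITION & SPEC =====
def Spec_get_general_recommendations_py (skills : List String) (experience : Int) (role : String) (out : List String) : Prop := out = get_general_recommendations_py_alt skills experience role
instance (skills : List String) (experience : Int) (role : String) (out : List String) : Decidable (Spec_get_general_recommendations_py skills experience role out) := by unfold Spec_get_general_recommendations_py; infer_instance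

-- ===== CLAIM (what is proved, stated in full; the proofs are below) =====
def Claim_equal_get_general_recommendations_py : Prop := ∀ (skills : List String) (experience : Int) (role : String), Dom_get_general_recommendations_py skills experience role → Spec_get_general_recommendations_py skills experience role (get_general_recommendations_py skills experience role)

-- ===== LEMMAS AND PROOFS =====
theorem pvPrune_eq_filter (skills : List String) (pending : List (String × String)) :
    pvPrune skills pending =
      pending.filter (fun r => !skills.any (fun s => PySem.Str.isIn r.1 s)) := by
  induction skills generalizing pending with
  | nil => simp [pvPrune]
  | cons x xs ih =>
      by_cases h : pending = []
      · simp [pvPrune, h]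
      · simp only [pvPrune, List.isEmpty_iff, h, if_neg, ih, List.filter_filter]
        apply List.filter_congr
        intro r _
        simp [Bool.and_comm]

theorem get_general_recommendations_py_eq (skills : List String) (experience : Int) (role : String) :
    get_general_recommendations_py skills experience role = get_general_recommendations_py_alt skills experience role := by
  unfold get_general_recommendations_py get_general_recommendations_py_alt
  simp only [pvPrune_eq_filter, pvRules, List.filter_cons, List.filter_nil]
  split_ifs <;> simp_all

-- ===== VERDICT (by name: the statement is the Claim_ definition above) =====
theorem get_general_recommendations_py_spec : Claim_equal_get_general_recommendations_py := by
  intro skills experience role _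
  exact get_general_recommendations_py_eq skills experience role
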